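-- pv_equiv track=rewrite | github.com/MK-Lee13/Algorithm-Study | Programmers/level_4/02_lyrics_search.py | get_query_val
-- ===== SOURCE A (Python) =====
-- def get_query_val(query):
--     q_count = 0
--     match_str = ""
--     q_pos = True # Left: True, Right: False
--     for i in range(len(query)):
--         _str = query[i]
--         if _str == "?":
--             q_count += 1
--             if match_str != "":
--                 q_pos = False
--         else:
--             match_str += _str
--     return q_count, q_pos, match_str
-- ===== SOURCE B (Python) =====
-- def get_query_val(query):
--     match_str = query.replace("?", "")
--     q_count = len(query) - len(match_str)
--     q_pos = query == "?" * q_count + match_str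
--     return q_count, q_pos, match_str
-- ===== Notes on version B (the rewrite author's own statement) =====
-- stated objective: simpler
-- what changed: The per-character flag-tracking loop is replaced by whole-string operations: strip the wildcard characters with str.replace, obtain the count as a length difference, and compute the position flag by rebuilding the expected query (wildcards first, then the literal part) and comparing for equality.
import Mathlib
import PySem

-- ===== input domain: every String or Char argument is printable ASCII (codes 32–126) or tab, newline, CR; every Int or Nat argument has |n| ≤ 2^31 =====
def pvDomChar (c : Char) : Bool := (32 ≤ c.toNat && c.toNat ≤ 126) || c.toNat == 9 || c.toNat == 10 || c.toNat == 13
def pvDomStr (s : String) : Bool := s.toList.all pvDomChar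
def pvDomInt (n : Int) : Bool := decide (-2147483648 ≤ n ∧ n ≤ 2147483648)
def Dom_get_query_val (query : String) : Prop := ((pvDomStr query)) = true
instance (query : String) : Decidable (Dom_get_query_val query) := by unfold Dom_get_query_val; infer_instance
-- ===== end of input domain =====

-- B replaces A's per-character flag-tracking loop by string methods: match_str = query.replace('?',''),
-- q_count as a length difference, and q_pos as the reconstruct-and-compare test query == '?'*q_count + match_str (simpler).


-- ===== PORT A =====
-- the loop over query's characters, carrying (q_count, q_pos, match_str)
def get_query_val (query : String) : Int × Bool × String :=
  let st := query.toList.foldl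
    (fun (st : Int × Bool × List Char) c =>
      if c = '?' then
        (st.1 + 1, if st.2.2 ≠ [] then false else st.2.1, st.2.2)
      else
        (st.1, st.2.1, st.2.2 ++ [c]))
    (0, true, [])
  (st.1, st.2.1, String.ofList st.2.2)

-- ===== PORT B =====
def get_query_val_alt (query : String) : Int × Bool × String :=
  let match_str := PySem.Str.replace query "?" ""
  let q_count : Int := PySem.Str.len query - PySem.Str.len match_str
  -- Python's string equality query == "?"*q_count + match_str, compared on the character lists (exact)
  let q_pos : Bool := query.toList == PySem.List.pyRepeat ['?'] q_count ++ match_str.toList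
  (q_count, q_pos, match_str)

-- ===== PRECONDITION & SPEC =====
def Spec_get_query_val (query : String) (out : Int × Bool × String) : Prop := out = get_query_val_alt query
instance (query : String) (out : Int × Bool × String) : Decidable (Spec_get_query_val query out) := by unfold Spec_get_query_val; infer_instance

-- ===== CLAIM (what is proved, stated in full; the proofs are below) =====
def Claim_equal_get_query_val : Prop := ∀ (query : String), Dom_get_query_val query → Spec_get_query_val query (get_query_val query)

-- ===== LEMMAS AND PROOFS =====

-- replace(s, "?", "") removes exactly the '?' characters
lemma replace_go_q (fuel : Nat) (l acc : List Char) (h : l.length ≤ fuel) :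
    PySem.Chars.replace.go ['?'] [] fuel l acc = acc.reverse ++ l.filter (fun c => c != '?') := by
  induction fuel generalizing l acc with
  | zero =>
    have : l = [] := List.eq_nil_of_length_eq_zero (Nat.le_zero.mp h)
    subst this; simp [PySem.Chars.replace.go]
  | succ f ih =>
    cases l with
    | nil => simp [PySem.Chars.replace.go]
    | cons c t =>
      simp only [PySem.Chars.replace.go]
      by_cases hc : c = '?'
      · subst hc
        rw [if_pos (by simp [List.isPrefixOf])]
        simp only [List.length, List.drop, List.reverse_nil, List.nil_append]
        rw [ih t acc (by simpa using h)]
        simp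
      · rw [if_neg (by simp [List.isPrefixOf]; exact Ne.symm hc)]
        rw [ih t (c :: acc) (by simpa using h)]
        simp [hc]

lemma replace_q (cs : List Char) :
    PySem.Chars.replace cs ['?'] [] = cs.filter (fun c => c != '?') := by
  rw [PySem.Chars.replace, if_neg (by simp)]
  simpa using replace_go_q cs.length cs []

-- characterisation of A's loop from an arbitrary state
lemma loopA (cs : List Char) (q : Int) (p : Bool) (ms : List Char) :
    cs.foldl
      (fun (st : Int × Bool × List Char) c =>
        if c = '?' then
          (st.1 + 1, if st.2.2 ≠ [] then false else st.2.1, st.2.2)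
        else
          (st.1, st.2.1, st.2.2 ++ [c]))
      (q, p, ms) =
    (q + (cs.countP (fun c => c == '?') : Int),
     p && (if ms = [] then
             decide (cs = List.replicate (cs.countP (fun c => c == '?')) '?'
                       ++ cs.filter (fun c => c != '?'))
           else !(cs.any (fun c => c == '?'))),
     ms ++ cs.filter (fun c => c != '?')) := by
  induction cs generalizing q p ms with
  | nil => simp
  | cons c t ih =>
    by_cases hc : c = '?'
    · subst hc
      simp only [List.foldl_cons, reduceIte]
      rw [ih]
      by_cases hm : ms = []
      · subst hm
        simp only [ne_eq, not_true_eq_false, reduceIte]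
        refine Prod.ext ?_ (Prod.ext ?_ ?_) <;> simp [List.replicate_succ]
        omega
      · simp only [ne_eq, hm, not_false_eq_true, if_pos]
        refine Prod.ext ?_ (Prod.ext ?_ ?_) <;> simp
        omega
    · simp only [List.foldl_cons, if_neg hc]
      rw [ih]
      have hmsc : ms ++ [c] ≠ [] := by simp
      refine Prod.ext ?_ (Prod.ext ?_ ?_)
      · simp [hc]
      · simp only [hmsc]
        by_cases hm : ms = []
        · subst hm
          by_cases hq : t.any (fun c => c == '?')
          · -- some '?' remains in t: both sides false
            have hk : 0 < t.countP (fun c => c == '?') := by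
              rw [List.any_eq_true] at hq
              obtain ⟨x, hx, hx'⟩ := hq
              rw [List.countP_pos_iff]
              exact ⟨x, hx, hx'⟩
            have : ¬ (c :: t = List.replicate ((c :: t).countP (fun c => c == '?')) '?'
                        ++ (c :: t).filter (fun c => c != '?')) := by
              intro he
              have hcount : (c :: t).countP (fun c => c == '?') = t.countP (fun c => c == '?') := by
                simp [hc]
              rw [hcount] at he
              cases hk' : t.countP (fun c => c == '?') with
              | zero => omega
              | succ n =>
                rw [hk', List.replicate_succ] at he
                exact hc (List.cons_eq_cons.mp he).1
            simp only [ite_true, ite_false, decide_eq_false this]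
            cases p <;> simp [hq]
          · -- no '?' in t: both sides true
            have hall : ∀ x ∈ t, ¬ (x == '?') = true := by
              intro x hx hx'
              exact hq (List.any_eq_true.mpr ⟨x, hx, hx'⟩)
            have hk : t.countP (fun c => c == '?') = 0 := List.countP_eq_zero.mpr hall
            have hf : t.filter (fun c => c != '?') = t := by
              apply List.filter_eq_self.mpr
              intro x hx
              simpa using hall x hx
            have : (c :: t = List.replicate ((c :: t).countP (fun c => c == '?')) '?'
                      ++ (c :: t).filter (fun c => c != '?')) := by
              simp [hc, hk, hf]
            simp only [ite_true, ite_false, decide_eq_true this]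
            cases p <;> simp [hq]
        · cases p <;> simp [hm, beq_iff_eq, hc]
      · simp [hc]

-- length difference = number of '?' characters
lemma len_sub_filter (cs : List Char) :
    ((cs.length : Int) - (cs.filter (fun c => c != '?')).length)
      = (cs.countP (fun c => c == '?') : Int) := by
  have h1 : (cs.filter (fun c => c != '?')).length = cs.countP (fun c => c != '?') :=
    (cs.countP_eq_length_filter).symm
  have h2 : cs.countP (fun c => c != '?') + cs.countP (fun c => c == '?') = cs.length := by
    simpa using (List.length_eq_countP_add_countP (l := cs) (p := fun c => c != '?')).symm
  omega

-- ===== VERDICT (by name: the statement is the Claim_ definition above) =====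
theorem get_query_val_spec : Claim_equal_get_query_val := by
  intro query _
  unfold Spec_get_query_val get_query_val get_query_val_alt
  simp only [PySem.Str.len, PySem.Str.replace, String.toList_ofList]
  rw [loopA]
  set cs := query.toList with hcs
  have hrep : PySem.Chars.replace cs "?".toList "".toList = cs.filter (fun c => c != '?') := by
    simpa using replace_q cs
  rw [hrep]
  have hlen : ((cs.length : Int) - ((cs.filter (fun c => c != '?')).length : Int))
      = (cs.countP (fun c => c == '?') : Int) := len_sub_filter cs
  refine Prod.ext ?_ (Prod.ext ?_ ?_)
  · simpa using hlen.symm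
  · rw [hlen, PySem.List.pyRepeat_singleton]
    simp only [Int.toNat_natCast]
    exact Eq.symm (Bool.beq_eq_decide_eq _ _)
  · rfl
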